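-- pv_equiv track=rewrite | github.com/kshelp/pythonLab | ch10_programming/ex05_duplicate.py | duplicatedNum
-- ===== SOURCE A (Python) =====
-- def duplicatedNum(s):
--     result = []  # [0,1,3,4,6]
--     for num in s:
--         if num not in result:
--             result.append(num)
--         else:
--             return False
--     return len(result) == 10
-- ===== SOURCE B (Python) =====
-- def duplicatedNum(s):
--     lst = sorted(s)
--     return len(lst) == 10 and all(a != b for a, b in zip(lst, lst[1:]))
-- ===== Notes on version B (the rewrite author's own statement) =====
-- stated objective: alternative
-- what changed: Sort-then-adjacent-scan: B sorts the input once and checks that the 10-element sorted list has no equal adjacent pair, instead of A's growing membership list with an early return on the first repeat.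
import Mathlib
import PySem

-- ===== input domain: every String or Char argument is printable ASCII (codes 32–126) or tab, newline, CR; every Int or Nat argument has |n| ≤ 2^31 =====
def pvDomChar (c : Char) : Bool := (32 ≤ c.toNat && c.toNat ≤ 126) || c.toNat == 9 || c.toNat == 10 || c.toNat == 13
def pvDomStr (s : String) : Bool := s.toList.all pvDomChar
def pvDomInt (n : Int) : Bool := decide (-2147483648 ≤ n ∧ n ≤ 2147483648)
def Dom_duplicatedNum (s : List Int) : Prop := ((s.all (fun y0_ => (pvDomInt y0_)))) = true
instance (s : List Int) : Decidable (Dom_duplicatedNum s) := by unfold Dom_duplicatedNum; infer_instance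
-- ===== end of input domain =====

-- B sorts the input once and checks that the 10-element sorted list has no equal adjacent
-- pair, instead of A's growing membership list with an early return (objective: alternative).

-- ===== PORT A =====
-- loop of A: 'result' is the accumulated list, early 'return False' on a duplicate
def duplicatedNumGo (s : List Int) (result : List Int) : Bool :=
  match s with
  | [] => result.length == 10
  | num :: rest =>
    if !(result.contains num) then duplicatedNumGo rest (result ++ [num])
    else false

def duplicatedNum (s : List Int) : Bool := duplicatedNumGo s []

-- ===== PORT B =====
-- 'all(a != b for a, b in zip(lst, lst[1:]))'; lst[1:] is lst.tail (exact for lists)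
def duplicatedNum_alt (s : List Int) : Bool :=
  let lst := PySem.List.sorted s (fun x => x) false
  lst.length == 10 && (lst.zip lst.tail).all (fun p => p.1 != p.2)

-- ===== PRECONDITION & SPEC =====
def Spec_duplicatedNum (s : List Int) (out : Bool) : Prop := out = duplicatedNum_alt s
instance (s : List Int) (out : Bool) : Decidable (Spec_duplicatedNum s out) := by unfold Spec_duplicatedNum; infer_instance

-- ===== CLAIM (what is proved, stated in full; the proofs are below) =====
def Claim_equal_duplicatedNum : Prop := ∀ (s : List Int), Dom_duplicatedNum s → Spec_duplicatedNum s (duplicatedNum s)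

-- ===== LEMMAS AND PROOFS =====

-- A's loop computes "no duplicate so far-and-later, and total length is 10"
theorem duplicatedNumGo_eq (s result : List Int) (hres : result.Nodup) :
    duplicatedNumGo s result =
      ((result ++ s).Nodup && (result.length + s.length == 10)) := by
  induction s generalizing result with
  | nil => simp [duplicatedNumGo, hres]
  | cons num rest ih =>
    by_cases hm : num ∈ result
    · have hnd : ¬ (result ++ num :: rest).Nodup :=
        fun h => (List.nodup_append.mp h).2.2 num hm num (List.mem_cons_self ..) rfl
      simp [duplicatedNumGo, hm, hnd]
    · have h1 : (result ++ [num]).Nodup := by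
        simp only [List.nodup_append, List.nodup_cons]
        exact ⟨hres, by simp, fun a ha b hb he => by
          simp only [List.mem_singleton] at hb
          exact hm (hb ▸ he ▸ ha)⟩
      rw [duplicatedNumGo, if_pos (by simp [hm]), ih _ h1]
      have h2 : result ++ [num] ++ rest = result ++ num :: rest := by simp
      have h3 : (result ++ [num]).length + rest.length
          = result.length + (num :: rest).length := by
        simp only [List.length_append, List.length_cons, List.length_nil]
        omega
      rw [h2, h3]

-- the zip-with-tail test is exactly IsChain (· ≠ ·)
theorem zip_tail_all_ne (l : List Int) :
    ((l.zip l.tail).all (fun p => p.1 != p.2) = true) ↔ l.IsChain (· ≠ ·) := by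
  induction l with
  | nil => simpa using List.isChain_nil
  | cons a t ih =>
    cases t with
    | nil => simpa using List.isChain_singleton a
    | cons b u =>
      simp only [List.tail_cons, List.zip_cons_cons, List.all_cons, Bool.and_eq_true,
        List.isChain_cons_cons, bne_iff_ne, ne_eq]
      rw [← ih]
      simp

-- on a (≤)-sorted list, no equal adjacent pair ↔ no duplicates at all
theorem chain_ne_iff_nodup_of_sorted (l : List Int) (hs : l.Pairwise (· ≤ ·)) :
    l.IsChain (· ≠ ·) ↔ l.Nodup := by
  constructor
  · intro hc
    have hle : l.IsChain (· ≤ ·) := hs.isChain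
    have hlt : l.IsChain (· < ·) := by
      rw [List.isChain_iff_getElem] at hc hle ⊢
      intro i h
      exact lt_of_le_of_ne (hle i h) (hc i h)
    have : l.Pairwise (· < ·) := List.isChain_iff_pairwise.mp hlt
    exact this.imp ne_of_lt
  · intro hn
    exact hn.isChain

-- ===== VERDICT (by name: the statement is the Claim_ definition above) =====
theorem duplicatedNum_spec : Claim_equal_duplicatedNum := by
  intro s _
  unfold Spec_duplicatedNum duplicatedNum duplicatedNum_alt
  rw [duplicatedNumGo_eq s [] List.nodup_nil]
  have hperm := PySem.List.sorted_perm s (fun x => x) false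
  have hlen : (PySem.List.sorted s (fun x => x) false).length = s.length := hperm.length_eq
  have hpw : (PySem.List.sorted s (fun x => x) false).Pairwise (· ≤ ·) := by
    simpa using PySem.List.sorted_pairwise s (fun x => x)
  have hnd : (PySem.List.sorted s (fun x => x) false).Nodup ↔ s.Nodup := hperm.nodup_iff
  simp only [List.nil_append, List.length_nil, Nat.zero_add, hlen]
  by_cases h : s.Nodup
  · have hc : (PySem.List.sorted s (fun x => x) false).IsChain (· ≠ ·) :=
      (chain_ne_iff_nodup_of_sorted _ hpw).mpr (hnd.mpr h)
    simp [h, (zip_tail_all_ne _).mpr hc, Bool.and_comm]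
  · have hc : ¬ (PySem.List.sorted s (fun x => x) false).IsChain (· ≠ ·) :=
      fun hc => h (hnd.mp ((chain_ne_iff_nodup_of_sorted _ hpw).mp hc))
    have : ((PySem.List.sorted s (fun x => x) false).zip
        (PySem.List.sorted s (fun x => x) false).tail).all (fun p => p.1 != p.2) = false := by
      rcases Bool.eq_false_or_eq_true (((PySem.List.sorted s (fun x => x) false).zip
        (PySem.List.sorted s (fun x => x) false).tail).all (fun p => p.1 != p.2)) with ht | hf
      · exact absurd ((zip_tail_all_ne _).mp ht) hc
      · exact hf
    simp [h, this]
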